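-- pv_equiv track=rewrite | github.com/olyakosyura/Python | string.py | Minword
-- ===== SOURCE A (Python) =====
-- def Minword(s):
--     s = s.split('.')
--     iminn = 0
--     minn = 10000
--     for i in range(len(s)):
--         s1 = s[i].split()
--         for j in range(len(s1)):
--             if minn > len(s1[j]):
--                 minn = len(s1[j])
--                 iminn = i
--     return s[iminn]
-- ===== SOURCE B (Python) =====
-- def Minword(s):
--     sents = s.split('.')
--     # pass 1: the global minimum word length (A's 10000 ceiling as the default)
--     lens = [len(w) for sent in sents for w in sent.split()]
--     m = min(lens, default=10000)
--     if m >= 10000: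
--         return sents[0]
--     # pass 2: the first sentence containing a word of that length
--     return next((sent for sent in sents if any(len(w) == m for w in sent.split())), sents[0])
-- ===== Notes on version B (the rewrite author's own statement) =====
-- stated objective: alternative
-- what changed: A's single fused nested scan carrying a strict-improvement (iminn, minn) argmin state is replaced by two separately-shaped passes: first compute the global minimum word length over all sentences (with A's 10000 ceiling as the empty default), then locate the first sentence containing a word of that length.
import Mathlib
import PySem

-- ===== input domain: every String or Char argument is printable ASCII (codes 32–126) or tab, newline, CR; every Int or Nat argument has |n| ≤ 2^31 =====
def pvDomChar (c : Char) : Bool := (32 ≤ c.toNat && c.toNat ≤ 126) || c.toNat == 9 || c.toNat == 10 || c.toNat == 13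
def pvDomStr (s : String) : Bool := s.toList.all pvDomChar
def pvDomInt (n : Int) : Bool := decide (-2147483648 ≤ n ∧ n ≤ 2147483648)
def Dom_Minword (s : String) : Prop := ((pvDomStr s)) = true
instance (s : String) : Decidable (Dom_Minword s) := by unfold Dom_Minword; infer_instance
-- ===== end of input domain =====

-- B replaces A's fused nested argmin scan by two separately-shaped passes (global minimum
-- word length, then first sentence containing a word of that length): same result, same cost.

-- ===== PORT A =====
-- A's fused scan: for i in range(len(s)): for j in range(len(s1)): strict-improvement argmin.
def Minword (s : String) : String :=
  let ss := (PySem.Str.split? s ".").getD []   -- sep "." ≠ "", so split? is always `some`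
  let st := (PySem.List.pyRange 0 (PySem.List.len ss)).foldl
    (fun (st : Int × Int) i =>
      let s1 := PySem.Str.split₀ (PySem.List.pyGetD ss i "")
      (PySem.List.pyRange 0 (PySem.List.len s1)).foldl
        (fun (st : Int × Int) j =>
          if st.2 > PySem.Str.len (PySem.List.pyGetD s1 j "") then
            (i, PySem.Str.len (PySem.List.pyGetD s1 j ""))
          else st) st)
    ((0 : Int), (10000 : Int))
  PySem.List.pyGetD ss st.1 ""   -- s[iminn]: 0 ≤ iminn < len(s) always, default unreachable

-- ===== PORT B =====
-- B's two passes: global min word length (default 10000), then locate the first sentence with it.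
def Minword_alt (s : String) : String :=
  let sents := (PySem.Str.split? s ".").getD []   -- sep "." ≠ "", so split? is always `some`
  let lens := sents.flatMap (fun sent => (PySem.Str.split₀ sent).map (fun w => PySem.Str.len w))
  let m := (PySem.List.min? lens (fun x => x)).getD 10000
  if m ≥ 10000 then PySem.List.pyGetD sents 0 ""   -- sents[0]: split never empty, default unreachable
  else
    match sents.find? (fun sent => (PySem.Str.split₀ sent).any (fun w => PySem.Str.len w == m)) with
    | some sent => sent
    | none => PySem.List.pyGetD sents 0 ""   -- next(...)'s default sents[0]

-- ===== PRECONDITION & SPEC =====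
def Spec_Minword (s : String) (out : String) : Prop := out = Minword_alt s
instance (s : String) (out : String) : Decidable (Spec_Minword s out) := by unfold Spec_Minword; infer_instance

-- ===== CLAIM (what is proved, stated in full; the proofs are below) =====
def Claim_equal_Minword : Prop := ∀ (s : String), Dom_Minword s → Spec_Minword s (Minword s)

-- ===== LEMMAS AND PROOFS =====

-- word lengths of a sentence
def pvWlen (sent : String) : List Int := (PySem.Str.split₀ sent).map PySem.Str.len

-- A's per-sentence step on the (iminn, minn) state, over an (index, sentence) pair
def pvStep (st : Int × Int) (p : Int × String) : Int × Int :=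
  (pvWlen p.2).foldl (fun st l => if st.2 > l then (p.1, l) else st) st

-- A's running minimum over a list of (index, sentence) pairs
def pvM (ps : List (Int × String)) (m : Int) : Int :=
  ps.foldl (fun m p => (pvWlen p.2).foldl min m) m

theorem pv_foldl_min_le (ls : List Int) (m : Int) : ls.foldl min m ≤ m := by
  induction ls generalizing m with
  | nil => simp
  | cons a t ih => exact le_trans (ih (min m a)) (min_le_left _ _)

theorem pv_foldl_min_mem_le (ls : List Int) (m l : Int) (h : l ∈ ls) : ls.foldl min m ≤ l := by
  induction ls generalizing m with
  | nil => simp at h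
  | cons a t ih =>
    rcases List.mem_cons.mp h with rfl | h'
    · exact le_trans (pv_foldl_min_le t (min m l)) (min_le_right _ _)
    · exact ih _ h'
theorem pv_foldl_min_attain (ls : List Int) (m : Int) :
    ls.foldl min m = m ∨ ls.foldl min m ∈ ls := by
  induction ls generalizing m with
  | nil => left; rfl
  | cons a t ih =>
    rcases ih (min m a) with h | h
    · simp only [List.foldl_cons, h]
      rcases le_total m a with hma | ham
      · left; exact min_eq_left hma
      · right; rw [min_eq_right ham]; exact List.mem_cons_self
    · right; exact List.mem_cons_of_mem _ h

theorem pv_foldl_min_min (ls : List Int) (a b : Int) :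
    ls.foldl min (min a b) = min a (ls.foldl min b) := by
  induction ls generalizing b with
  | nil => rfl
  | cons c t ih =>
    simp only [List.foldl_cons, min_assoc, ih]

theorem pv_inner (ls : List Int) (i : Int) (st : Int × Int) :
    ls.foldl (fun st l => if st.2 > l then (i, l) else st) st
      = (if ls.foldl min st.2 < st.2 then i else st.1, ls.foldl min st.2) := by
  induction ls generalizing st with
  | nil => simp
  | cons l t ih =>
    simp only [List.foldl_cons]
    by_cases h : st.2 > l
    · rw [if_pos h, ih (i, l)]
      have hml : min st.2 l = l := min_eq_right (le_of_lt h)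
      have h2 : t.foldl min l ≤ l := pv_foldl_min_le t l
      simp only [hml]
      rw [if_pos (lt_of_le_of_lt h2 h)]
      split <;> rfl
    · rw [if_neg h, ih st]
      have : min st.2 l = st.2 := min_eq_left (le_of_not_gt h)
      simp only [this]

theorem pvM_le (ps : List (Int × String)) (m : Int) : pvM ps m ≤ m := by
  induction ps generalizing m with
  | nil => exact le_refl m
  | cons p t ih =>
    exact le_trans (ih _) (pv_foldl_min_le _ _)

theorem pvM_attain (ps : List (Int × String)) (m : Int) :
    pvM ps m = m ∨ ∃ p ∈ ps, pvM ps m ∈ pvWlen p.2 := by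
  induction ps generalizing m with
  | nil => left; rfl
  | cons p t ih =>
    have hM : pvM (p :: t) m = pvM t ((pvWlen p.2).foldl min m) := rfl
    rcases ih ((pvWlen p.2).foldl min m) with h | ⟨q, hq, hmem⟩
    · rcases pv_foldl_min_attain (pvWlen p.2) m with h2 | h2
      · left; rw [hM, h, h2]
      · right; exact ⟨p, List.mem_cons_self, by rw [hM, h]; exact h2⟩
    · right; exact ⟨q, List.mem_cons_of_mem _ hq, by rw [hM]; exact hmem⟩

theorem pv_outer (ps : List (Int × String)) (st : Int × Int) :
    ps.foldl pvStep st
      = (if pvM ps st.2 < st.2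
           then ((ps.find? (fun p => (pvWlen p.2).any (fun l => l == pvM ps st.2))).map
                   Prod.fst).getD st.1
           else st.1,
         pvM ps st.2) := by
  induction ps generalizing st with
  | nil => simp [pvM]
  | cons p t ih =>
    have hstep : pvStep st p
        = (if (pvWlen p.2).foldl min st.2 < st.2 then p.1 else st.1,
           (pvWlen p.2).foldl min st.2) := pv_inner _ _ _
    set m1 := (pvWlen p.2).foldl min st.2 with hm1
    have hm1le : m1 ≤ st.2 := pv_foldl_min_le _ _
    have hM : pvM (p :: t) st.2 = pvM t m1 := rfl
    set M := pvM t m1 with hMdef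
    have hMle : M ≤ m1 := pvM_le _ _
    simp only [List.foldl_cons, hstep, ih, hM]
    rw [← hMdef]
    by_cases hlt : M < m1
    · -- a strictly smaller word occurs later: the head sentence cannot contain M
      have hpred : ((pvWlen p.2).any (fun l => l == M)) = false := by
        rw [List.any_eq_false]
        intro l hl
        have : m1 ≤ l := pv_foldl_min_mem_le _ _ _ hl
        simp only [beq_iff_eq]
        omega
      have hfind : (p :: t).find? (fun p => (pvWlen p.2).any (fun l => l == M))
          = t.find? (fun p => (pvWlen p.2).any (fun l => l == M)) := by
        rw [List.find?_cons_of_neg (by simp [hpred])]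
      rcases pvM_attain t m1 with h | ⟨q, hq, hmem⟩
      · omega
      · have : ∃ x ∈ t, ((pvWlen x.2).any (fun l => l == M)) = true :=
          ⟨q, hq, by rw [List.any_eq_true]; exact ⟨M, hmem, by simp⟩⟩
        rcases List.find?_isSome.mpr this |> Option.isSome_iff_exists.mp with ⟨q₀, hq₀⟩
        rw [hfind, hq₀, if_pos hlt, if_pos (lt_of_lt_of_le hlt hm1le)]
        split <;> rfl
    · -- the minimum is already reached in the head sentence (or not at all)
      have hMeq : M = m1 := le_antisymm hMle (by omega)
      by_cases h2 : m1 < st.2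
      · have hmem : m1 ∈ pvWlen p.2 := by
          rcases pv_foldl_min_attain (pvWlen p.2) st.2 with h | h
          · rw [← hm1] at h; omega
          · rwa [← hm1] at h
        have hpred : ((pvWlen p.2).any (fun l => l == M)) = true := by
          rw [List.any_eq_true]; exact ⟨m1, hmem, by simp [hMeq]⟩
        have hfind : (p :: t).find? (fun q => (pvWlen q.2).any (fun l => l == M)) = some p :=
          List.find?_cons_of_pos hpred
        rw [hfind, if_neg hlt, if_pos h2, if_pos (show M < st.2 by omega)]
        simp
      · have : m1 = st.2 := le_antisymm hm1le (le_of_not_gt h2)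
        rw [if_neg h2, if_neg (by omega), if_neg (by omega)]

-- a successful find? over enumerate: the stored index looks the found element back up
theorem pv_enum_find (ss : List String) (n : Nat) (q : String → Bool) (p : Int × String)
    (h : (PySem.List.enumerate ss (n : Int)).find? (fun x => q x.2) = some p) :
    ∃ k : Nat, p.1 = ((n + k : Nat) : Int) ∧ ss.getD k "" = p.2 ∧ ss.find? q = some p.2 := by
  induction ss generalizing n with
  | nil => simp [PySem.List.enumerate] at h
  | cons a t ih =>
    rw [show PySem.List.enumerate (a :: t) (n : Int) = ((n : Int), a) :: PySem.List.enumerate t ((n : Int) + 1) from rfl] at h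
    by_cases hq : q a
    · rw [List.find?_cons_of_pos (by simpa using hq)] at h
      injection h with h
      subst h
      refine ⟨0, by simp, by simp, ?_⟩
      rw [List.find?_cons_of_pos hq]
    · rw [List.find?_cons_of_neg (by simpa using hq)] at h
      have h' : (PySem.List.enumerate t ((n + 1 : Nat) : Int)).find? (fun x => q x.2) = some p := by
        rw [show (((n + 1 : Nat) : Int)) = (n : Int) + 1 by push_cast; ring]; exact h
      rcases ih (n + 1) h' with ⟨k, hk1, hk2, hk3⟩
      refine ⟨k + 1, ?_, ?_, ?_⟩
      · rw [hk1]; push_cast; ring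
      · simpa using hk2
      · rw [List.find?_cons_of_neg (by simp [hq])]; exact hk3

-- A's running minimum over the enumerated sentences is the fold over concatenated word lengths
theorem pvM_flat (ss : List String) (n : Int) (m : Int) :
    pvM (PySem.List.enumerate ss n) m = (ss.flatMap pvWlen).foldl min m := by
  induction ss generalizing n m with
  | nil => rfl
  | cons a t ih =>
    rw [show PySem.List.enumerate (a :: t) n = (n, a) :: PySem.List.enumerate t (n + 1) from rfl]
    simp only [List.flatMap_cons, List.foldl_append]
    exact ih _ _

theorem pv_core (ss : List String) :
    PySem.List.pyGetD ss
      (((PySem.List.pyRange 0 (PySem.List.len ss)).foldl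
        (fun (st : Int × Int) i =>
          let s1 := PySem.Str.split₀ (PySem.List.pyGetD ss i "")
          (PySem.List.pyRange 0 (PySem.List.len s1)).foldl
            (fun (st : Int × Int) j =>
              if st.2 > PySem.Str.len (PySem.List.pyGetD s1 j "") then
                (i, PySem.Str.len (PySem.List.pyGetD s1 j ""))
              else st) st)
        ((0 : Int), (10000 : Int))).1) ""
    = (if ((PySem.List.min? (ss.flatMap (fun sent => (PySem.Str.split₀ sent).map (fun w => PySem.Str.len w))) (fun x => x)).getD 10000) ≥ 10000 then
        PySem.List.pyGetD ss 0 ""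
      else
        match ss.find? (fun sent => (PySem.Str.split₀ sent).any (fun w => PySem.Str.len w == ((PySem.List.min? (ss.flatMap (fun sent => (PySem.Str.split₀ sent).map (fun w => PySem.Str.len w))) (fun x => x)).getD 10000))) with
        | some sent => sent
        | none => PySem.List.pyGetD ss 0 "") := by
  -- rewrite A's index loops as a fold of pvStep over the enumerated sentences
  have hA :
      (PySem.List.pyRange 0 (PySem.List.len ss)).foldl
        (fun (st : Int × Int) i =>
          let s1 := PySem.Str.split₀ (PySem.List.pyGetD ss i "")
          (PySem.List.pyRange 0 (PySem.List.len s1)).foldl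
            (fun (st : Int × Int) j =>
              if st.2 > PySem.Str.len (PySem.List.pyGetD s1 j "") then
                (i, PySem.Str.len (PySem.List.pyGetD s1 j ""))
              else st) st)
        ((0 : Int), (10000 : Int))
      = (PySem.List.enumerate ss 0).foldl pvStep ((0 : Int), (10000 : Int)) := by
    rw [PySem.List.enumerate_eq_map_pyRange ss "", List.foldl_map]
    apply List.foldl_ext
    intro st i _
    show (PySem.List.pyRange 0 (PySem.List.len (PySem.Str.split₀ (PySem.List.pyGetD ss i "")))).foldl
        (fun (st : Int × Int) j =>
          if st.2 > PySem.Str.len (PySem.List.pyGetD (PySem.Str.split₀ (PySem.List.pyGetD ss i "")) j "") then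
            (i, PySem.Str.len (PySem.List.pyGetD (PySem.Str.split₀ (PySem.List.pyGetD ss i "")) j ""))
          else st) st = _
    rw [PySem.List.foldl_pyRange_zero_pyGetD (PySem.Str.split₀ (PySem.List.pyGetD ss i "")) ""
      (fun (st : Int × Int) w => if st.2 > PySem.Str.len w then (i, PySem.Str.len w) else st) st]
    simp only [pvStep, pvWlen, List.foldl_map]
  rw [hA, pv_outer]
  have hwl : ss.flatMap (fun sent => (PySem.Str.split₀ sent).map (fun w => PySem.Str.len w))
      = ss.flatMap pvWlen := rfl
  rw [hwl]
  have hMf : pvM (PySem.List.enumerate ss 0) 10000 = (ss.flatMap pvWlen).foldl min 10000 :=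
    pvM_flat ss 0 10000
  rcases hl : ss.flatMap pvWlen with _ | ⟨x, t⟩
  · -- no words at all: both fall back to sents[0]
    rw [hl] at hMf
    simp only [hMf, List.foldl_nil]
    rw [if_neg (lt_irrefl _), (PySem.List.min?_eq_none_iff ([] : List Int) (fun x => x)).mpr rfl]
    simp
  · -- m = true minimum, A's fold minimum is min 10000 m
    rw [hl] at hMf
    rw [PySem.List.min?_id_cons, Option.getD_some]
    set m := t.foldl min x with hm
    have hM10 : pvM (PySem.List.enumerate ss 0) 10000 = min 10000 m := by
      rw [hMf, List.foldl_cons, pv_foldl_min_min]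
    by_cases hge : m ≥ 10000
    · rw [if_pos hge, hM10, min_eq_left hge, if_neg (lt_irrefl _)]
    · rw [if_neg hge, hM10, min_eq_right (le_of_not_ge hge)]
      rw [if_pos (lt_of_not_ge hge)]
      -- the minimum is attained, so both finds succeed on the same first sentence
      have hex : ∃ p ∈ PySem.List.enumerate ss 0, ((pvWlen p.2).any (fun l => l == m)) = true := by
        rcases pvM_attain (PySem.List.enumerate ss 0) 10000 with h | ⟨p, hp, hmem⟩
        · rw [hM10, min_eq_right (le_of_not_ge hge)] at h; omega
        · rw [hM10, min_eq_right (le_of_not_ge hge)] at hmem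
          exact ⟨p, hp, by rw [List.any_eq_true]; exact ⟨m, hmem, by simp⟩⟩
      rcases List.find?_isSome.mpr hex |> Option.isSome_iff_exists.mp with ⟨p₀, hp₀⟩
      rcases pv_enum_find ss 0 (fun sent => (pvWlen sent).any (fun l => l == m)) p₀
        (by simpa using hp₀) with ⟨k, hk1, hk2, hk3⟩
      have hBpred : (fun sent => (PySem.Str.split₀ sent).any (fun w => PySem.Str.len w == m))
          = (fun sent => (pvWlen sent).any (fun l => l == m)) := by
        funext sent; rw [pvWlen, List.any_map]; rfl
      rw [hBpred, hk3, hp₀, Option.map_some, Option.getD_some, hk1,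
        PySem.List.pyGetD_natCast, Nat.zero_add, hk2]

theorem Minword_eq_alt (s : String) : Minword s = Minword_alt s := by
  simp only [Minword, Minword_alt]
  exact pv_core _

-- ===== VERDICT (by name: the statement is the Claim_ definition above) =====
theorem Minword_spec : Claim_equal_Minword := by
  intro s _
  unfold Spec_Minword
  exact Minword_eq_alt s
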